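-- pv_equiv track=rewrite | github.com/Gauri013/Programming-Problems | practice/kaprekar_constant.py | min_num
-- ===== SOURCE A (Python) =====
-- def min_num(num):
--     listOfDigits = digits(num)
--     length = len(listOfDigits)
--     s = 0
--     listOfDigits.sort()
--     for i in range (0,length):
--         s = s * 10 + listOfDigits[i]
--     minNum= s
--     return (minNum)
--
-- def digits(num):
--     listOfDigits = []
--     while(num > 0):
--         digit = num % 10
--         num = int(num // 10)
--         listOfDigits.append(digit)
--     return(listOfDigits)
-- ===== SOURCE B (Python) =====
-- def min_num(num):
--     count = [0] * 10
--     while num > 0: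
--         count[num % 10] += 1
--         num = int(num // 10)
--     s = 0
--     for d in range(10):
--         for _ in range(count[d]):
--             s = s * 10 + d
--     return s
-- ===== Notes on version B (the rewrite author's own statement) =====
-- stated objective: alternative
-- what changed: Replaces the comparison sort of the digit list by a counting sort: digits are tallied into a ten-slot frequency array during extraction and the result is rebuilt by a single ascending Horner pass over the possible digits, with no digit list and no sort call at all.
import Mathlib
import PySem

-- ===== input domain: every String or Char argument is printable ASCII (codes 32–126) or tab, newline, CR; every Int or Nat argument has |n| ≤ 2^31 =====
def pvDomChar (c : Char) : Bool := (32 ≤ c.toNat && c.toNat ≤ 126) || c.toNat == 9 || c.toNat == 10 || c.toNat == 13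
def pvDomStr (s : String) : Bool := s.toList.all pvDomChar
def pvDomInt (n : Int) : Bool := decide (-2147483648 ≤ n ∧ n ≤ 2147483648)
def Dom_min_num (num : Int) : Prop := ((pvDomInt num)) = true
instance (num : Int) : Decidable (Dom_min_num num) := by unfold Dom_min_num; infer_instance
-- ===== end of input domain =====

-- B replaces A's comparison sort of the digit list by a counting sort over a ten-slot
-- frequency array; equal return values are proved for every Int (both are total).

-- ===== PORT A =====
-- helper: Python 'digits(num)' — extract digits low-to-high while num > 0
def pvDigits (num : Int) : List Int :=
  if _h : num > 0 then
    PySem.Int.mod num 10 :: pvDigits (PySem.Int.floordiv num 10)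
  else []
termination_by num.toNat
decreasing_by
  simp only [PySem.Int.floordiv_eq_ediv_of_pos (by norm_num : (0:Int) < 10)]
  omega

def min_num (num : Int) : Int :=
  let listOfDigits := PySem.List.sorted (pvDigits num) id false
  let length : Int := listOfDigits.length
  (PySem.List.pyRange 0 length 1).foldl
    (fun s i => s * 10 + PySem.List.pyGetD listOfDigits i 0) 0

-- ===== PORT B =====
-- helper: B's while loop tallying each digit into the frequency array 'count'
-- (the index num % 10 is provably a nonnegative single digit when num > 0, so List.set/getD with .toNat is exact)
def pvCountDigits (num : Int) (count : List Int) : List Int :=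
  if _h : num > 0 then
    pvCountDigits (PySem.Int.floordiv num 10)
      (count.set (PySem.Int.mod num 10).toNat
        (count.getD (PySem.Int.mod num 10).toNat 0 + 1))
  else count
termination_by num.toNat
decreasing_by
  simp only [PySem.Int.floordiv_eq_ediv_of_pos (by norm_num : (0:Int) < 10)]
  omega

def min_num_alt (num : Int) : Int :=
  let count := pvCountDigits num (List.replicate 10 0)
  (PySem.List.pyRange 0 10 1).foldl
    (fun s d =>
      (PySem.List.pyRange 0 (count.getD d.toNat 0) 1).foldl (fun s _ => s * 10 + d) s) 0

-- ===== PRECONDITION & SPEC =====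
def Spec_min_num (num : Int) (out : Int) : Prop := out = min_num_alt num
instance (num : Int) (out : Int) : Decidable (Spec_min_num num out) := by unfold Spec_min_num; infer_instance

-- ===== CLAIM (what is proved, stated in full; the proofs are below) =====
def Claim_equal_min_num : Prop := ∀ (num : Int), Dom_min_num num → Spec_min_num num (min_num num)

-- ===== LEMMAS AND PROOFS =====

-- every extracted digit lies in [0, 10)
theorem pvDigits_mem_bound (num : Int) : ∀ x ∈ pvDigits num, 0 ≤ x ∧ x < 10 := by
  fun_induction pvDigits num with
  | case1 num h ih =>
    intro x hx
    rcases List.mem_cons.mp hx with rfl | hx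
    · exact ⟨PySem.Int.mod_nonneg _ (by norm_num), PySem.Int.mod_lt _ (by norm_num)⟩
    · exact ih x hx
  | case2 => intro x hx; simp at hx

-- invariant of the tally loop: final slot k = initial slot k + digit count
theorem pvCountDigits_getD (num : Int) (count : List Int) (hlen : count.length = 10) :
    ∀ k : Nat, k < 10 →
      (pvCountDigits num count).getD k 0 = count.getD k 0 + ((pvDigits num).count (k : Int) : Int) := by
  fun_induction pvCountDigits num count with
  | case1 num count h ih =>
    intro k hk
    have hm0 : 0 ≤ PySem.Int.mod num 10 := PySem.Int.mod_nonneg _ (by norm_num)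
    have hm10 : PySem.Int.mod num 10 < 10 := PySem.Int.mod_lt _ (by norm_num)
    have hlen' : (count.set (PySem.Int.mod num 10).toNat
        (count.getD (PySem.Int.mod num 10).toNat 0 + 1)).length = 10 := by simpa using hlen
    rw [ih hlen' k hk]
    have hd : pvDigits num = PySem.Int.mod num 10 :: pvDigits (PySem.Int.floordiv num 10) := by
      rw [pvDigits]; exact dif_pos h
    rw [hd]
    by_cases hek : (PySem.Int.mod num 10).toNat = k
    · subst hek
      have hmk : PySem.Int.mod num 10 = ((PySem.Int.mod num 10).toNat : Int) := by omega
      rw [List.getD_eq_getElem?_getD, List.getElem?_set_self (by omega)]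
      simp [List.getD_eq_getElem?_getD, List.count_cons]
      rw [if_pos (by omega : (0:Int) ≤ num % 10)]
      ring
    · have hmm : PySem.Int.mod num 10 = num % 10 :=
        PySem.Int.mod_eq_emod_of_pos (by norm_num)
      rw [hmm] at hm0 hm10 hek ⊢
      rw [List.getD_eq_getElem?_getD, List.getElem?_set_ne hek]
      simp [List.getD_eq_getElem?_getD, List.count_cons]
      omega
  | case2 num count h =>
    intro k hk
    have hd : pvDigits num = [] := by rw [pvDigits]; exact dif_neg h
    rw [hd]; simp

-- fold that ignores its element = Horner fold over a replicate of the same length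
theorem foldl_ignore_replicate (d : Int) (l : List Int) :
    ∀ s : Int, l.foldl (fun s _ => s * 10 + d) s
      = (List.replicate l.length d).foldl (fun s x => s * 10 + x) s := by
  induction l with
  | nil => intro s; rfl
  | cons x xs ih => intro s; simp only [List.foldl, List.length_cons, List.replicate_succ]; exact ih _

-- the outer per-digit loop builds the Horner fold of the concatenated replicate blocks
theorem outer_fold (cnt : List Int) :
    ∀ (n : Nat) (s : Int),
      (PySem.List.pyRange 0 (n : Int) 1).foldl
        (fun s d => (PySem.List.pyRange 0 (cnt.getD d.toNat 0) 1).foldl (fun s _ => s * 10 + d) s) s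
      = ((List.range n).flatMap (fun d => List.replicate (cnt.getD d 0).toNat (d : Int))).foldl
          (fun s x => s * 10 + x) s := by
  intro n
  induction n with
  | zero => intro s; rfl
  | succ n ih =>
    intro s
    rw [show ((n + 1 : Nat) : Int) = (n : Int) + 1 by push_cast; ring,
      PySem.List.pyRange_one_succ_right (by positivity), List.range_succ]
    simp only [List.foldl_append, List.flatMap_append, List.flatMap_cons, List.flatMap_nil,
      List.append_nil, List.foldl_append]
    rw [ih]
    simp only [List.foldl_cons, List.foldl_nil]
    have := foldl_ignore_replicate (n : Int)
      (PySem.List.pyRange 0 (cnt.getD ((n : Int)).toNat 0) 1)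
    rw [this, PySem.List.length_pyRange_one]
    simp

-- count of a in the flatMap of replicates
theorem count_flat (c : Nat → Nat) :
    ∀ (n : Nat) (a : Int),
      ((List.range n).flatMap (fun d => List.replicate (c d) (d : Int))).count a
        = if 0 ≤ a ∧ a < (n : Int) then c a.toNat else 0 := by
  intro n
  induction n with
  | zero =>
    intro a
    simp only [List.range_zero, List.flatMap_nil, List.count_nil]
    rw [if_neg (by omega)]
  | succ n ih =>
    intro a
    rw [List.range_succ]
    simp only [List.flatMap_append, List.flatMap_cons, List.flatMap_nil, List.append_nil,
      List.count_append, ih a, List.count_replicate]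
    by_cases hna : (n : Int) = a
    · have : a.toNat = n := by omega
      simp [hna, this]
      intro hlt
      exact absurd hlt (by omega)
    · simp only [beq_iff_eq, hna, if_false]
      split_ifs with h1 h2 <;> first | rfl | omega

-- the concatenated blocks are a sorted permutation of the digit list
theorem flat_eq_sorted (num : Int) :
    ((List.range 10).flatMap (fun d : Nat => List.replicate ((pvDigits num).count (d : Int)) (d : Int)))
      = PySem.List.sorted (pvDigits num) id false := by
  have h1 : ((List.range 10).flatMap
      (fun d : Nat => List.replicate ((pvDigits num).count (d : Int)) (d : Int))).Perm
      (pvDigits num) := by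
    rw [List.perm_iff_count]
    intro a
    rw [count_flat (fun k => (pvDigits num).count (k : Int)) 10 a]
    by_cases ha : 0 ≤ a ∧ a < (10 : Int)
    · have : ((a.toNat : Int)) = a := by omega
      simp [ha, this]
    · rw [if_neg (by omega), eq_comm, List.count_eq_zero]
      intro hmem
      exact ha ⟨(pvDigits_mem_bound num a hmem).1, (pvDigits_mem_bound num a hmem).2⟩
  have hperm := h1.trans (PySem.List.sorted_perm (pvDigits num) (id : Int → Int) false).symm
  refine hperm.eq_of_pairwise (fun a b _ _ hab hba => le_antisymm hab hba) ?_ ?_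
  · -- the flatMap of replicates is sorted
    rw [List.pairwise_flatMap]
    constructor
    · intro d _
      exact List.pairwise_replicate.mpr (Or.inr le_rfl)
    · refine List.Pairwise.imp ?_ (List.pairwise_lt_range (n := 10))
      intro d e hde x hx y hy
      rw [List.eq_of_mem_replicate hx, List.eq_of_mem_replicate hy]
      exact_mod_cast le_of_lt hde
  · -- PySem's sort is sorted
    exact PySem.List.sorted_pairwise _ _

-- ===== VERDICT (by name: the statement is the Claim_ definition above) =====
theorem min_num_spec : Claim_equal_min_num := by
  intro num _
  unfold Spec_min_num min_num min_num_alt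
  rw [PySem.List.foldl_pyRange_zero_pyGetD']
  have hcnt : ∀ d ∈ List.range 10,
      List.replicate ((pvCountDigits num (List.replicate 10 0)).getD d 0).toNat (d : Int)
        = List.replicate ((pvDigits num).count (d : Int)) (d : Int) := by
    intro d hd
    rw [pvCountDigits_getD num (List.replicate 10 0) (by simp) d (List.mem_range.mp hd)]
    have hd10 := List.mem_range.mp hd
    have : ([0, 0, 0, 0, 0, 0, 0, 0, 0, (0:Int)][d]?).getD 0 = 0 := by
      interval_cases d <;> rfl
    simp [List.replicate, this]
  have h10 := outer_fold (pvCountDigits num (List.replicate 10 0)) 10 0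
  rw [List.flatMap_congr hcnt, flat_eq_sorted num] at h10
  exact h10.symm
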